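-- pv_equiv track=rewrite | github.com/PrajwalSood/Machine-Learning | data_preprocessing/labelencoder.py | convert_to_numerical_labels
-- ===== SOURCE A (Python) =====
-- def convert_to_numerical_labels(X):
--     uniques_values = list(set(X))
--     uniques_values.sort()
--
--     #preparing map of unique values to numerical labels
--     unique_values_labels_map = {}
--     for i in range(0,len(uniques_values)):
--         unique_values_labels_map[uniques_values[i]]=i
--
--     #converting data to numerical labels
--     X_numerical = []
--     for i in range(0,len(X)):
--         numerical_value = unique_values_labels_map[X[i]]
--         X_numerical.append(numerical_value)
--
--     return X_numerical
-- ===== SOURCE B (Python) =====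
-- def convert_to_numerical_labels(X):
--     # label of x = its rank among the distinct values, found by binary search
--     d = sorted(set(X))
--     def rank(x):
--         lo, hi = 0, len(d)
--         while lo < hi:
--             mid = (lo + hi) // 2
--             if d[mid] < x:
--                 lo = mid + 1
--             else:
--                 hi = mid
--         return lo
--     return [rank(x) for x in X]
-- ===== Notes on version B (the rewrite author's own statement) =====
-- stated objective: alternative
-- what changed: B drops A's value-to-index dict entirely: it sorts the distinct values once and finds each element's label by a hand-rolled binary search (bisect_left) over that sorted list.
import Mathlib
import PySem

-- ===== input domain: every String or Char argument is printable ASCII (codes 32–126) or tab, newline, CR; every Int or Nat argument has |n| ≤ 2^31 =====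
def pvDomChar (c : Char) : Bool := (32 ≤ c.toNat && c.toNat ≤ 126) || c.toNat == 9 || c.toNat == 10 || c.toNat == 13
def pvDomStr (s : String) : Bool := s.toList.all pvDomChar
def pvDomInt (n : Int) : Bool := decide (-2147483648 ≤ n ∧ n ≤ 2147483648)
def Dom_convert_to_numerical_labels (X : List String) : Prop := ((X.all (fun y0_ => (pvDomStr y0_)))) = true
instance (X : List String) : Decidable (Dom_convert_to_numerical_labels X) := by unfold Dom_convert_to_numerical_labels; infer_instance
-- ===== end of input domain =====

-- B drops A's value->index dict: it sorts the distinct values once and finds each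
-- element's label by a hand-rolled binary search over that sorted list (alternative algorithm).


-- ===== PORT A =====
-- uniques_values = list(set(X)); uniques_values.sort()
-- for i in range(0, len(uniques_values)): map[uniques_values[i]] = i
-- for i in range(0, len(X)): X_numerical.append(map[X[i]])
-- (the dict lookup always succeeds — every X[i] is a key — so it is ported as getD with an unused default)
def convert_to_numerical_labels (X : List String) : List Int :=
  let uniques_values := PySem.List.sorted (PySem.Set.ofList X) (fun v => v) false
  let unique_values_labels_map : PySem.Dict String Int :=
    (PySem.List.pyRange 0 (PySem.List.len uniques_values) 1).foldl
      (fun d i => d.insert (PySem.List.pyGetD uniques_values i "") i) PySem.Dict.empty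
  (PySem.List.pyRange 0 (PySem.List.len X) 1).foldl
    (fun acc i => acc ++ [unique_values_labels_map.getD (PySem.List.pyGetD X i "") (-1)]) []

-- ===== PORT B =====
-- B's inner while loop (indices lo, hi are Python ints; d[mid] is always in range here,
-- so it is ported as pyGetD with an unused default)
def pvRankLoop (d : List String) (x : String) (lo hi : Int) : Int :=
  if h : lo < hi then
    let mid := PySem.Int.floordiv (lo + hi) 2
    if PySem.List.pyGetD d mid "" < x then pvRankLoop d x (mid + 1) hi
    else pvRankLoop d x lo mid
  else lo
termination_by (hi - lo).toNat
decreasing_by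
  · have hml := (PySem.Int.floordiv_two_mid_bounds (le_of_lt h)).1
    omega
  · have h2 : PySem.Int.floordiv (lo + hi) 2 < hi := by
      rw [PySem.Int.floordiv_lt_iff_lt_mul (by omega)]
      omega
    omega

-- d = sorted(set(X)); return [rank(x) for x in X]
def convert_to_numerical_labels_alt (X : List String) : List Int :=
  let d := PySem.List.sorted (PySem.Set.ofList X) (fun v => v) false
  X.map (fun x => pvRankLoop d x 0 (PySem.List.len d))

-- ===== PRECONDITION & SPEC =====
def Spec_convert_to_numerical_labels (X : List String) (out : List Int) : Prop := out = convert_to_numerical_labels_alt X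
instance (X : List String) (out : List Int) : Decidable (Spec_convert_to_numerical_labels X out) := by unfold Spec_convert_to_numerical_labels; infer_instance

-- ===== CLAIM (what is proved, stated in full; the proofs are below) =====
def Claim_equal_convert_to_numerical_labels : Prop := ∀ (X : List String), Dom_convert_to_numerical_labels X → Spec_convert_to_numerical_labels X (convert_to_numerical_labels X)

-- ===== LEMMAS AND PROOFS =====

-- A's dict-building loop: looking up a member of a duplicate-free list gives (start + its index).
theorem pv_get_fold_insert {κ : Type} [BEq κ] [LawfulBEq κ] (us : List κ) (s : Int)
    (d : PySem.Dict κ Int) (v : κ) (hnd : us.Nodup) (hv : v ∈ us) :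
    ((PySem.List.enumerate us s).foldl (fun d p => d.insert p.2 p.1) d).get? v
      = some (s + (us.idxOf v : Int)) := by
  induction us generalizing s d with
  | nil => cases hv
  | cons x t ih =>
    rw [PySem.List.enumerate_cons]
    simp only [List.foldl_cons]
    rcases List.mem_cons.1 hv with rfl | hvt
    · have hxt : v ∉ t := (List.nodup_cons.1 hnd).1
      have hstay : ∀ (u : List κ) (s' : Int) (d' : PySem.Dict κ Int), v ∉ u →
          ((PySem.List.enumerate u s').foldl (fun d p => d.insert p.2 p.1) d').get? v
            = d'.get? v := by
        intro u
        induction u with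
        | nil => intro s' d' _; simp [PySem.List.enumerate_nil]
        | cons y w ih2 =>
          intro s' d' hnm
          rw [PySem.List.enumerate_cons]
          simp only [List.foldl_cons]
          rw [ih2 (s' + 1) _ (fun h => hnm (List.mem_cons_of_mem _ h))]
          exact PySem.Dict.get?_insert_of_ne _ _ (fun h => hnm (h ▸ List.mem_cons_self))
      rw [hstay t (s + 1) _ hxt]
      simp [PySem.Dict.get?_insert_self, List.idxOf_cons_self]
    · have hvx : v ≠ x := by
        intro h; exact (List.nodup_cons.1 hnd).1 (h ▸ hvt)
      rw [ih (s + 1) _ (List.nodup_cons.1 hnd).2 hvt]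
      have hidx : (x :: t).idxOf v = t.idxOf v + 1 := by
        simp [List.idxOf_cons, beq_false_of_ne (Ne.symm hvx)]
      rw [hidx]
      push_cast
      ring_nf

-- index of a member of a strictly increasing list = number of elements below it
theorem pv_idxOf_eq_countP {α : Type} [LinearOrder α] [DecidableEq α] (us : List α) (v : α)
    (hp : us.Pairwise (· < ·)) (hv : v ∈ us) :
    us.idxOf v = us.countP (fun u => decide (u < v)) := by
  induction us with
  | nil => cases hv
  | cons x t ih =>
    rcases List.mem_cons.1 hv with rfl | hvt
    · have h0 : t.countP (fun u => decide (u < v)) = 0 := by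
        rw [List.countP_eq_zero]
        intro u hu
        have := (List.pairwise_cons.1 hp).1 u hu
        simp [not_lt.2 (le_of_lt this)]
      simp [List.idxOf_cons_self, h0]
    · have hxv : x < v := (List.pairwise_cons.1 hp).1 v hvt
      have hvx : v ≠ x := (ne_of_gt hxv)
      rw [List.idxOf_cons, ih (List.pairwise_cons.1 hp).2 hvt]
      simp [beq_false_of_ne (Ne.symm hvx), hxv]

-- a predicate true on exactly the first k positions has count k
theorem pv_countP_prefix {α : Type} (p : α → Bool) (d : List α) :
    ∀ (k : Nat), k ≤ d.length → (∀ (j : Nat) (hj : j < d.length), (p d[j] = true ↔ j < k)) →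
    d.countP p = k := by
  induction d with
  | nil => intro k hk _; simpa using (Nat.le_zero.1 hk).symm
  | cons y t ih =>
    intro k hk hc
    cases k with
    | zero =>
      have h0 : p y = false := by
        have := hc 0 (by simp)
        simpa using this
      have ht : t.countP p = 0 := by
        refine ih 0 (by omega) ?_
        intro j hj
        have := hc (j + 1) (by simpa using Nat.succ_lt_succ hj)
        simpa using this
      simp [h0, ht]
    | succ k' =>
      have h1 : p y = true := by
        have := hc 0 (by simp)
        simpa using this
      have ht : t.countP p = k' := by
        refine ih k' (by simpa using hk) ?_
        intro j hj
        have := hc (j + 1) (by simpa using Nat.succ_lt_succ hj)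
        simpa [Nat.succ_lt_succ_iff] using this
      simp [h1, ht]

-- the binary search returns the number of elements below x, given the bracket invariants
theorem pv_rank_spec (d : List String) (x : String) (hp : d.Pairwise (· < ·)) :
    ∀ (n : Nat) (lo hi : Int), (hi - lo).toNat = n → 0 ≤ lo → lo ≤ hi → hi ≤ (d.length : Int) →
    (∀ (j : Nat) (hj : j < d.length), (j : Int) < lo → d[j] < x) →
    (∀ (j : Nat) (hj : j < d.length), hi ≤ (j : Int) → ¬ d[j] < x) →
    pvRankLoop d x lo hi = (d.countP (fun u => decide (u < x)) : Int) := by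
  intro n
  induction n using Nat.strong_induction_on with
  | _ n ih =>
    intro lo hi hn h0 hlohi hhil hlo hhi
    rw [pvRankLoop]
    by_cases h : lo < hi
    · rw [dif_pos h]
      have hmid := PySem.Int.floordiv_two_mid_bounds (le_of_lt h)
      have hmlt : PySem.Int.floordiv (lo + hi) 2 < hi := by
        rw [PySem.Int.floordiv_lt_iff_lt_mul (by omega)]
        omega
      set mid := PySem.Int.floordiv (lo + hi) 2 with hmiddef
      have hmr : mid.toNat < d.length := by omega
      have hmg : PySem.List.pyGetD d mid "" = d[mid.toNat] :=
        PySem.List.pyGetD_eq_getElem d "" (by omega) (by omega)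
      by_cases hc : PySem.List.pyGetD d mid "" < x
      · rw [if_pos hc]
        refine ih (hi - (mid + 1)).toNat (by omega) (mid + 1) hi (rfl) (by omega) (by omega) hhil ?_ hhi
        intro j hj hjlt
        by_cases hjlo : (j : Int) < lo
        · exact hlo j hj hjlo
        · -- lo ≤ j ≤ mid : d[j] ≤ d[mid] < x
          rcases eq_or_lt_of_le (show (j : Int) ≤ mid by omega) with heq | hlt
          · have hjm : j = mid.toNat := by omega
            subst hjm
            rw [hmg] at hc; exact hc
          · have hjm : j < mid.toNat := by omega
            have hRel := List.pairwise_iff_getElem.1 hp j mid.toNat hj hmr hjm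
            rw [hmg] at hc
            exact lt_trans hRel hc
      · rw [if_neg hc]
        refine ih (mid - lo).toNat (by omega) lo mid (rfl) (by omega) (by omega) (by omega) hlo ?_
        intro j hj hjge
        -- mid ≤ j : x ≤ d[mid] ≤ d[j]
        rcases eq_or_lt_of_le hjge with heq | hlt
        · have hjm : j = mid.toNat := by omega
          subst hjm
          rw [hmg] at hc; exact hc
        · have hjm : mid.toNat < j := by omega
          have hRel := List.pairwise_iff_getElem.1 hp mid.toNat j hmr hj hjm
          rw [hmg] at hc
          intro hcon
          exact hc (lt_trans hRel hcon)
    · rw [dif_neg h]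
      have hle : lo = hi := le_antisymm hlohi (not_lt.1 h)
      have : d.countP (fun u => decide (u < x)) = lo.toNat := by
        refine pv_countP_prefix _ d lo.toNat (by omega) ?_
        intro j hj
        constructor
        · intro hpj
          by_contra hcon
          exact absurd (by simpa using hpj) (hhi j hj (by omega))
        · intro hjlt
          simpa using hlo j hj (by omega)
      rw [this]
      omega

-- ===== VERDICT (by name: the statement is the Claim_ definition above) =====
theorem convert_to_numerical_labels_spec : Claim_equal_convert_to_numerical_labels := by
  intro X _
  unfold Spec_convert_to_numerical_labels convert_to_numerical_labels convert_to_numerical_labels_alt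
  simp only []
  set uniques := PySem.List.sorted (PySem.Set.ofList X) (fun v => v) false with hu
  set m : PySem.Dict String Int :=
    (PySem.List.pyRange 0 (PySem.List.len uniques) 1).foldl
      (fun d i => d.insert (PySem.List.pyGetD uniques i "") i) PySem.Dict.empty with hm
  -- A's output loop is a map over X
  rw [PySem.List.foldl_pyRange_zero_pyGetD X "" (fun acc x => acc ++ [m.getD x (-1)]) [],
      PySem.List.foldl_append_singleton_eq_map]
  -- m is the fold of inserts over enumerate uniques
  have hm' : m = (PySem.List.enumerate uniques).foldl (fun d p => d.insert p.2 p.1)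
      PySem.Dict.empty := by
    rw [hm, PySem.List.enumerate_eq_map_pyRange uniques "", List.foldl_map]
  have hpw : uniques.Pairwise (· < ·) := hu ▸ PySem.List.sorted_ofList_pairwise_lt X
  -- pointwise equality on members of X
  rw [List.nil_append]
  apply List.map_congr_left
  intro x hx
  have hxu : x ∈ uniques := by
    rw [hu, PySem.List.mem_sorted, PySem.Set.mem_ofList]; exact hx
  have hget : m.get? x = some ((uniques.idxOf x : Int)) := by
    rw [hm']
    have := pv_get_fold_insert uniques 0 PySem.Dict.empty x
      ((PySem.List.sorted_perm _ _ _).nodup_iff.2 (PySem.Set.nodup_ofList X)) hxu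
    simpa using this
  rw [PySem.Dict.getD_eq_get?_getD, hget, Option.getD_some]
  rw [pv_idxOf_eq_countP uniques x hpw hxu]
  rw [pv_rank_spec uniques x hpw (uniques.length - 0) 0 (PySem.List.len uniques)
    (by simp [PySem.List.len]) (by omega) (by simp [PySem.List.len]) (by simp [PySem.List.len])
    (by intro j hj hcon; omega) (by intro j hj hcon; simp [PySem.List.len] at hcon; omega)]
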